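-- pv_equiv track=rewrite | github.com/danimelsz/PrepDyn | src/prepDyn_auxiliary.py | compute_summary_after
-- ===== SOURCE A (Python) =====
-- def compute_summary_after(alignment):
--     num_seqs = len(alignment)
--
--     # Transpose to columns
--     columns = list(zip(*alignment.values()))
--
--     # Count columns that contain pound signs
--     total_pound = sum('#' in col for col in columns)
--
--     # Alignment length excluding columns of only pound signs
--     aln_length = sum(1 for col in columns if set(col) != {'#'})
--
--     # Count nucleotide and gap characters
--     total_nt = sum(c in "ACGTacgt" for seq in alignment.values() for c in seq)
--     total_gaps = sum(seq.count("-") for seq in alignment.values())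
--     total_ns = sum(c in "Nn" for seq in alignment.values() for c in seq)
--     total_qm = sum(seq.count("?") for seq in alignment.values())  # <- includes everything now
--
--     # Count additional missing data as gap-only blocks between #
--     missing_by_partition = 0
--     for seq in alignment.values():
--         parts = seq.split("#")
--         for part in parts:
--             if all(c == '-' for c in part):
--                 missing_by_partition += len(part)
--
--     total_missing = total_qm + missing_by_partition
--
--     return {
--         "num_seqs": num_seqs,
--         "aln_length": aln_length,
--         "total_nt": total_nt,
--         "total_gaps": total_gaps,
--         "total_ns": total_ns,
--         "total_qm": total_qm,
--         "total_pound": total_pound,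
--         "missing_by_partition": missing_by_partition,
--         "total_missing": total_missing
--     }
-- ===== SOURCE B (Python) =====
-- def compute_summary_after(alignment):
--     seqs = list(alignment.values())
--     num_seqs = len(seqs)
--     L = min(len(s) for s in seqs) if seqs else 0
--
--     # Column statistics via position SETS: the set of '#'-positions (below L)
--     # of each sequence; a column has a '#' iff its index is in the UNION, and
--     # is all-'#' iff its index is in the INTERSECTION of these sets.
--     pound_union = set()
--     pound_inter = None
--     # One character histogram for the whole alignment; all per-class totals
--     # are read off it at the end.
--     hist = {}
--     # Gap-only blocks between '#': a single state-machine scan per sequence.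
--     missing_by_partition = 0
--     for seq in seqs:
--         pos = {i for i in range(L) if seq[i] == '#'}
--         pound_union |= pos
--         pound_inter = pos if pound_inter is None else pound_inter & pos
--         for c in seq:
--             hist[c] = hist.get(c, 0) + 1
--         blk, only_dash = 0, True
--         for c in seq:
--             if c == '#':
--                 if only_dash:
--                     missing_by_partition += blk
--                 blk, only_dash = 0, True
--             elif c == '-':
--                 blk += 1
--             else:
--                 only_dash = False
--         if only_dash:
--             missing_by_partition += blk
--
--     total_pound = len(pound_union)
--     aln_length = L - (len(pound_inter) if pound_inter is not None else 0)
--     total_nt = sum(hist.get(c, 0) for c in "ACGTacgt")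
--     total_gaps = hist.get('-', 0)
--     total_ns = hist.get('N', 0) + hist.get('n', 0)
--     total_qm = hist.get('?', 0)
--
--     return {
--         "num_seqs": num_seqs,
--         "aln_length": aln_length,
--         "total_nt": total_nt,
--         "total_gaps": total_gaps,
--         "total_ns": total_ns,
--         "total_qm": total_qm,
--         "total_pound": total_pound,
--         "missing_by_partition": missing_by_partition,
--         "total_missing": total_qm + missing_by_partition,
--     }
-- ===== Notes on version B (the rewrite author's own statement) =====
-- stated objective: alternative
-- what changed: B replaces A's zip-transpose column scans by set algebra on '#'-position sets (union for total_pound, intersection for aln_length), replaces A's four separate per-class counting passes by one character histogram dict read off at the end, and replaces split('#')-then-all('-') by a single state-machine scan per sequence.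
import Mathlib
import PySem

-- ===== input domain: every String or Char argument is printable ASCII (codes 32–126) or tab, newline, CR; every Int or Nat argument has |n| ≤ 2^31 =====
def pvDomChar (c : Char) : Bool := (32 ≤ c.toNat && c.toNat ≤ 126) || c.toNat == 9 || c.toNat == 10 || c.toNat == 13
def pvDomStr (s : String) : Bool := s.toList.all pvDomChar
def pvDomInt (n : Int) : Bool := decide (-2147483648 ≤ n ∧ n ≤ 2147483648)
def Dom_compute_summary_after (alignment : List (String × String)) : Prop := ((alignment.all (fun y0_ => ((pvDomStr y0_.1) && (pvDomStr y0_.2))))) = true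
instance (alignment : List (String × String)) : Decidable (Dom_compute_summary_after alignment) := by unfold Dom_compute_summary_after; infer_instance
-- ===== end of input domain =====

-- B replaces A's zip-transpose column scans by set algebra on '#'-position sets
-- (union / intersection), A's per-class counting passes by one character histogram,
-- and A's split('#') gap-block pass by a single state-machine scan (objective: alternative).

-- ===== PORT A =====
-- shortest sequence length (fuel for the zip: Python's zip stops exactly there)
def minLen : List (List Char) → Nat
  | [] => 0
  | s :: rest => rest.foldl (fun m t => Nat.min m t.length) s.length

-- zip(*seqs): take heads while no list is exhausted; fuel only makes it total
def pyZipGo : Nat → List (List Char) → List (List Char)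
  | 0, _ => []
  | n+1, ls =>
    if ls.any List.isEmpty then []
    else ls.map (fun l => l.headD ' ') :: pyZipGo n (ls.map List.tail)

def compute_summary_after (alignment : List (String × String)) : List (String × Int) :=
  let num_seqs : Int := alignment.length
  let seqs : List (List Char) := alignment.map (fun p => p.2.toList)
  let columns : List (List Char) := pyZipGo (minLen seqs) seqs
  let total_pound : Int := (columns.map (fun col => if col.contains '#' then (1:Int) else 0)).sum
  let aln_length : Int := (columns.map (fun col =>
      if !(PySem.Set.equal (PySem.Set.ofList col) (PySem.Set.ofList ['#'])) then (1:Int) else 0)).sum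
  let total_nt : Int := (seqs.map (fun seq =>
      (seq.map (fun c => if PySem.Chars.isIn [c] "ACGTacgt".toList then (1:Int) else 0)).sum)).sum
  let total_gaps : Int := (seqs.map (fun seq => (PySem.Chars.count seq ['-'] : Int))).sum
  let total_ns : Int := (seqs.map (fun seq =>
      (seq.map (fun c => if PySem.Chars.isIn [c] "Nn".toList then (1:Int) else 0)).sum)).sum
  let total_qm : Int := (seqs.map (fun seq => (PySem.Chars.count seq ['?'] : Int))).sum
  let missing_by_partition : Int := seqs.foldl (fun m seq =>
      (PySem.Chars.splitOn seq ['#']).foldl (fun m part =>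
        if part.all (fun c => c == '-') then m + (part.length : Int) else m) m) 0
  let total_missing : Int := total_qm + missing_by_partition
  [("num_seqs", num_seqs), ("aln_length", aln_length), ("total_nt", total_nt),
   ("total_gaps", total_gaps), ("total_ns", total_ns), ("total_qm", total_qm),
   ("total_pound", total_pound), ("missing_by_partition", missing_by_partition),
   ("total_missing", total_missing)]

-- ===== PORT B =====
-- {i for i in range(L) if seq[i] == '#'}; i < L ≤ len(seq), so seq[i] never raises
def poundPos (L : Nat) (seq : List Char) : PySem.Set Nat :=
  PySem.Set.ofList ((List.range L).filter (fun i => seq.getD i ' ' == '#'))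

-- the per-sequence state machine of Source B: (blk, only_dash, missing accumulator)
def mbpScan : List Char → Int → Bool → Int → Int
  | [], blk, od, acc => if od then acc + blk else acc
  | c :: rest, blk, od, acc =>
    if c == '#' then mbpScan rest 0 true (if od then acc + blk else acc)
    else if c == '-' then mbpScan rest (blk + 1) od acc
    else mbpScan rest blk false acc

def compute_summary_after_alt (alignment : List (String × String)) : List (String × Int) :=
  let seqs : List (List Char) := alignment.map (fun p => p.2.toList)
  let num_seqs : Int := seqs.length
  let L : Nat := minLen seqs   -- min(len(s) for s in seqs) if seqs else 0
  let st := seqs.foldl (fun st seq =>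
      let pos := poundPos L seq
      ((PySem.Set.union st.1.1 pos,
        some (match st.1.2 with
              | none => pos
              | some s => PySem.Set.inter s pos)),
       (seq.foldl (fun d c => d.modify c 0 (· + 1)) st.2.1,
        mbpScan seq 0 true st.2.2)))
      (((PySem.Set.empty : PySem.Set Nat), (none : Option (PySem.Set Nat))),
       ((PySem.Dict.empty : PySem.Dict Char Int), (0 : Int)))
  let hist := st.2.1
  let total_pound : Int := (st.1.1.length : Int)
  let aln_length : Int := (L : Int) - (match st.1.2 with
                                       | some s => (s.length : Int)
                                       | none => 0)
  let total_nt : Int := ("ACGTacgt".toList.map (fun c => hist.getD c 0)).sum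
  let total_gaps : Int := hist.getD '-' 0
  let total_ns : Int := hist.getD 'N' 0 + hist.getD 'n' 0
  let total_qm : Int := hist.getD '?' 0
  [("num_seqs", num_seqs), ("aln_length", aln_length), ("total_nt", total_nt),
   ("total_gaps", total_gaps), ("total_ns", total_ns), ("total_qm", total_qm),
   ("total_pound", total_pound), ("missing_by_partition", st.2.2),
   ("total_missing", total_qm + st.2.2)]

-- ===== PRECONDITION & SPEC =====
def Spec_compute_summary_after (alignment : List (String × String)) (out : List (String × Int)) : Prop := out = compute_summary_after_alt alignment
instance (alignment : List (String × String)) (out : List (String × Int)) : Decidable (Spec_compute_summary_after alignment out) := by unfold Spec_compute_summary_after; infer_instance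

-- ===== CLAIM (what is proved, stated in full; the proofs are below) =====
def Claim_equal_compute_summary_after : Prop := ∀ (alignment : List (String × String)), Dom_compute_summary_after alignment → Spec_compute_summary_after alignment (compute_summary_after alignment)


-- ===== LEMMAS AND PROOFS =====

-- minLen is a lower bound for every length
theorem foldl_minLen_le (rest : List (List Char)) (a : Nat) :
    rest.foldl (fun m t => Nat.min m t.length) a ≤ a ∧
    ∀ t ∈ rest, rest.foldl (fun m t => Nat.min m t.length) a ≤ t.length := by
  induction rest generalizing a with
  | nil => simp
  | cons x xs ih =>
    refine ⟨le_trans (ih (Nat.min a x.length)).1 (Nat.min_le_left _ _), ?_⟩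
    intro t ht
    rcases List.mem_cons.1 ht with h | h
    · subst h; exact le_trans (ih _).1 (Nat.min_le_right _ _)
    · exact (ih _).2 t h

theorem minLen_le (seqs : List (List Char)) : ∀ l ∈ seqs, minLen seqs ≤ l.length := by
  cases seqs with
  | nil => simp
  | cons s rest =>
    intro l hl
    rcases List.mem_cons.1 hl with h | h
    · subst h; exact (foldl_minLen_le rest (l.length)).1
    · exact (foldl_minLen_le rest (s.length)).2 l h

-- the zip produces exactly the first n columns, read by index
theorem pyZipGo_eq (n : Nat) :
    ∀ (ls : List (List Char)), (∀ l ∈ ls, n ≤ l.length) →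
    pyZipGo n ls = (List.range n).map (fun j => ls.map (fun l => l.getD j ' ')) := by
  induction n with
  | zero => intro ls _; simp [pyZipGo]
  | succ n ih =>
    intro ls h
    have hne : ls.any List.isEmpty = false := by
      simp only [List.any_eq_false]
      intro l hl
      have := h l hl
      cases l <;> simp_all
    rw [pyZipGo, hne]
    simp only [Bool.false_eq_true, if_false]
    rw [ih (ls.map List.tail) (by
      intro l hl
      rcases List.mem_map.1 hl with ⟨l', hl', rfl⟩
      have := h l' hl'
      cases l' <;> simp_all)]
    rw [List.range_succ_eq_map]
    simp only [List.map_cons, List.map_map]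
    refine congrArg₂ List.cons ?_ ?_
    · exact List.map_congr_left (fun l _ => by cases l <;> rfl)
    · exact List.map_congr_left (fun j _ => by
        simp only [Function.comp_def]
        exact List.map_congr_left (fun l _ => by cases l <;> rfl))

theorem cols_eq (seqs : List (List Char)) :
    pyZipGo (minLen seqs) seqs = (List.range (minLen seqs)).map (fun j => seqs.map (fun l => l.getD j ' ')) :=
  pyZipGo_eq (minLen seqs) seqs (minLen_le seqs)

-- Chars.count of a single character is List.count
theorem countGo_single (c : Char) :
    ∀ (s : List Char) (fuel acc : Nat), s.length ≤ fuel →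
    PySem.Chars.count.go [c] fuel s acc = acc + s.count c := by
  intro s
  induction s with
  | nil => intro fuel acc _; cases fuel <;> simp [PySem.Chars.count.go]
  | cons x t ih =>
    intro fuel acc h
    cases fuel with
    | zero => simp at h
    | succ m =>
      rw [PySem.Chars.count.go]
      by_cases hx : c = x
      · subst hx
        have hp : [c].isPrefixOf (c :: t) = true := by simp [List.isPrefixOf]
        simp only [hp, if_true]
        simp only [List.length_cons, List.length_nil, List.drop_succ_cons, List.drop_zero]
        rw [ih m (acc + 1) (by simpa using h)]
        simp [List.count_cons_self]
        omega
      · have hbeq : (c == x) = false := by simpa [beq_iff_eq] using hx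
        have hp : [c].isPrefixOf (x :: t) = false := by simp [List.isPrefixOf, hbeq]
        simp only [hp, Bool.false_eq_true, if_false]
        rw [ih m acc (by simpa using h)]
        have hxc : ¬ x = c := fun e => hx e.symm
        simp [hxc]

theorem count_single (c : Char) (s : List Char) :
    PySem.Chars.count s [c] = s.count c := by
  rw [PySem.Chars.count]
  simp only [List.isEmpty_cons, Bool.false_eq_true, if_false]
  simpa using countGo_single c s s.length 0 le_rfl

-- single-character "in" is list membership
theorem isIn_single (c : Char) (s : List Char) :
    (PySem.Chars.isIn [c] s = true) ↔ c ∈ s := by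
  rw [PySem.Chars.isIn_iff_infix, List.singleton_infix_iff]

theorem pound_eq (seqs : List (List Char)) :
    ((pyZipGo (minLen seqs) seqs).map (fun col => if col.contains '#' then (1:Int) else 0)).sum
      = ((List.range (minLen seqs)).map (fun i => if seqs.any (fun s => s.getD i ' ' == '#') then (1:Int) else 0)).sum := by
  rw [cols_eq, List.map_map]
  refine congrArg List.sum (List.map_congr_left (fun j _ => ?_))
  have h : ((seqs.map (fun l => l.getD j ' ')).contains '#') = (seqs.any (fun s => s.getD j ' ' == '#')) := by
    rw [Bool.eq_iff_iff]
    simp only [List.contains_iff_mem, List.mem_map, List.any_eq_true, beq_iff_eq]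
  simp only [Function.comp_def, h]

theorem set_equal_iff (col : List Char) :
    PySem.Set.equal (PySem.Set.ofList col) (PySem.Set.ofList ['#']) = true ↔ ((∀ c ∈ col, c = '#') ∧ '#' ∈ col) := by
  simp only [PySem.Set.equal, PySem.Set.issubset, PySem.Set.contains, Bool.and_eq_true,
    List.all_eq_true, List.contains_iff_mem, PySem.Set.mem_ofList]
  simp

theorem aln_eq (seqs : List (List Char)) (hne : seqs ≠ []) :
    ((pyZipGo (minLen seqs) seqs).map (fun col =>
        if !(PySem.Set.equal (PySem.Set.ofList col) (PySem.Set.ofList ['#'])) then (1:Int) else 0)).sum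
      = ((List.range (minLen seqs)).map (fun i => if seqs.any (fun s => !(s.getD i ' ' == '#')) then (1:Int) else 0)).sum := by
  rw [cols_eq, List.map_map]
  refine congrArg List.sum (List.map_congr_left (fun j _ => ?_))
  have h : (!(PySem.Set.equal (PySem.Set.ofList (seqs.map (fun l => l.getD j ' '))) (PySem.Set.ofList ['#'])))
      = seqs.any (fun s => !(s.getD j ' ' == '#')) := by
    rw [Bool.eq_iff_iff, Bool.not_eq_eq_eq_not, Bool.not_true, ← Bool.not_eq_true,
      set_equal_iff (seqs.map (fun l => l.getD j ' '))]
    constructor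
    · intro hno
      by_contra hany
      have hall : ∀ s ∈ seqs, s.getD j ' ' = '#' := by
        intro s hs
        by_contra hv
        exact hany (List.any_eq_true.2 ⟨s, hs, by simpa using hv⟩)
      refine hno ⟨?_, ?_⟩
      · intro c hc
        rcases List.mem_map.1 hc with ⟨s, hs, rfl⟩
        exact hall s hs
      · rcases List.exists_mem_of_ne_nil seqs hne with ⟨s, hs⟩
        exact (hall s hs) ▸ List.mem_map.2 ⟨s, hs, rfl⟩
    · intro hany hand
      rcases List.any_eq_true.1 hany with ⟨s, hs, hv⟩
      have hsv : s.getD j ' ' = '#' := hand.1 _ (List.mem_map.2 ⟨s, hs, rfl⟩)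
      rw [hsv] at hv
      simp at hv
  simp only [Function.comp_def, h]

-- ---- B-side: the combined fold is four independent folds ----
theorem fold4_decompose {α β γ δ ε : Type} (f : α → ε → α) (g : β → ε → β)
    (h : γ → ε → γ) (k : δ → ε → δ) :
    ∀ (l : List ε) (a : α) (b : β) (c : γ) (d : δ),
    l.foldl (fun st e => ((f st.1.1 e, g st.1.2 e), (h st.2.1 e, k st.2.2 e))) ((a, b), (c, d))
      = ((l.foldl f a, l.foldl g b), (l.foldl h c, l.foldl k d)) := by
  intro l
  induction l with
  | nil => intro a b c d; rfl
  | cons x t ih => intro a b c d; simp only [List.foldl_cons]; exact ih _ _ _ _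

-- ---- position sets ----
theorem mem_poundPos (L : Nat) (s : List Char) (j : Nat) :
    j ∈ poundPos L s ↔ j < L ∧ s.getD j ' ' = '#' := by
  simp [poundPos, PySem.Set.mem_ofList, List.mem_filter]

theorem nodup_poundPos (L : Nat) (s : List Char) : (poundPos L s).Nodup :=
  PySem.Set.nodup_ofList _

theorem unionFold_spec (L : Nat) (seqs : List (List Char)) :
    ∀ (u : PySem.Set Nat), u.Nodup →
    (seqs.foldl (fun u seq => PySem.Set.union u (poundPos L seq)) u).Nodup ∧
    ∀ j, j ∈ seqs.foldl (fun u seq => PySem.Set.union u (poundPos L seq)) u ↔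
      (j ∈ u ∨ ∃ s ∈ seqs, j ∈ poundPos L s) := by
  induction seqs with
  | nil => intro u hu; simpa using hu
  | cons s rest ih =>
    intro u hu
    have hnd : (PySem.Set.union u (poundPos L s)).Nodup := PySem.Set.nodup_union _ _ hu
    obtain ⟨h1, h2⟩ := ih (PySem.Set.union u (poundPos L s)) hnd
    refine ⟨h1, fun j => ?_⟩
    rw [List.foldl_cons, h2 j, PySem.Set.mem_union]
    constructor
    · rintro ((h | h) | ⟨t, ht, hj⟩)
      · exact Or.inl h
      · exact Or.inr ⟨s, List.mem_cons_self, h⟩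
      · exact Or.inr ⟨t, List.mem_cons_of_mem _ ht, hj⟩
    · rintro (h | ⟨t, ht, hj⟩)
      · exact Or.inl (Or.inl h)
      · rcases List.mem_cons.1 ht with rfl | ht'
        · exact Or.inl (Or.inr hj)
        · exact Or.inr ⟨t, ht', hj⟩

theorem optFold_some (L : Nat) (rest : List (List Char)) :
    ∀ (s : PySem.Set Nat),
    rest.foldl (fun i seq => some (match i with
        | none => poundPos L seq
        | some s => PySem.Set.inter s (poundPos L seq))) (some s)
      = some (rest.foldl (fun s seq => PySem.Set.inter s (poundPos L seq)) s) := by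
  induction rest with
  | nil => intro s; rfl
  | cons x t ih => intro s; simp only [List.foldl_cons]; exact ih _

theorem interFold_spec (L : Nat) (rest : List (List Char)) :
    ∀ (s : PySem.Set Nat), s.Nodup →
    (rest.foldl (fun s seq => PySem.Set.inter s (poundPos L seq)) s).Nodup ∧
    ∀ j, j ∈ rest.foldl (fun s seq => PySem.Set.inter s (poundPos L seq)) s ↔
      (j ∈ s ∧ ∀ t ∈ rest, j ∈ poundPos L t) := by
  induction rest with
  | nil => intro s hs; simpa using hs
  | cons x t ih =>
    intro s hs
    obtain ⟨h1, h2⟩ := ih (PySem.Set.inter s (poundPos L x)) (PySem.Set.nodup_inter _ _ hs)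
    refine ⟨h1, fun j => ?_⟩
    rw [List.foldl_cons, h2 j, PySem.Set.mem_inter]
    constructor
    · rintro ⟨⟨hj, hx⟩, hall⟩
      refine ⟨hj, fun u hu => ?_⟩
      rcases List.mem_cons.1 hu with rfl | hu'
      · exact hx
      · exact hall u hu'
    · rintro ⟨hj, hall⟩
      exact ⟨⟨hj, hall x List.mem_cons_self⟩, fun u hu => hall u (List.mem_cons_of_mem _ hu)⟩

-- Nodup list with the members {j ∈ range L | P j} has length countP P (range L)
theorem length_eq_countP (L : Nat) (S : List Nat) (P : Nat → Bool) (hS : S.Nodup)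
    (hmem : ∀ j, j ∈ S ↔ j < L ∧ P j = true) :
    S.length = (List.range L).countP P := by
  rw [List.countP_eq_length_filter]
  refine List.Perm.length_eq ((List.perm_ext_iff_of_nodup hS ((List.nodup_range).filter P)).2 ?_)
  intro j
  rw [hmem j, List.mem_filter, List.mem_range]

theorem countP_add_not (p : Nat → Bool) (l : List Nat) :
    l.countP p + l.countP (fun a => !p a) = l.length := by
  induction l with
  | nil => rfl
  | cons x t ih => by_cases h : p x <;> simp [List.countP_cons, h] <;> omega

-- ---- histogram ----
theorem histFold_getD (seqs : List (List Char)) :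
    ∀ (d : PySem.Dict Char Int) (c : Char),
    (seqs.foldl (fun d seq => seq.foldl (fun d c => d.modify c 0 (· + 1)) d) d).getD c 0
      = d.getD c 0 + (seqs.map (fun s => (s.count c : Int))).sum := by
  induction seqs with
  | nil => intro d c; simp
  | cons s rest ih =>
    intro d c
    simp only [List.foldl_cons, List.map_cons, List.sum_cons]
    rw [ih, PySem.Dict.getD_foldl_modify_add_one]
    ring

-- per-sequence class counts as plain character counts
theorem acgt_toList : "ACGTacgt".toList = ['A', 'C', 'G', 'T', 'a', 'c', 'g', 't'] := by decide

theorem nn_toList : "Nn".toList = ['N', 'n'] := by decide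

theorem nt_split (t : List Char) :
    t.countP (fun c => PySem.Chars.isIn [c] (['A', 'C', 'G', 'T', 'a', 'c', 'g', 't'] : List Char))
      = t.count 'A' + t.count 'C' + t.count 'G' + t.count 'T'
        + t.count 'a' + t.count 'c' + t.count 'g' + t.count 't' := by
  induction t with
  | nil => rfl
  | cons x s ih =>
    simp only [List.countP_cons, List.count_cons]
    by_cases hx : x ∈ (['A', 'C', 'G', 'T', 'a', 'c', 'g', 't'] : List Char)
    · have hin : PySem.Chars.isIn [x] ['A', 'C', 'G', 'T', 'a', 'c', 'g', 't'] = true :=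
        (isIn_single _ _).2 hx
      fin_cases hx <;> simp [hin, ih] <;> omega
    · have hni : PySem.Chars.isIn [x] ['A', 'C', 'G', 'T', 'a', 'c', 'g', 't'] = false := by
        rw [← Bool.not_eq_true, isIn_single]; exact hx
      have hs : x ≠ 'A' ∧ x ≠ 'C' ∧ x ≠ 'G' ∧ x ≠ 'T' ∧ x ≠ 'a' ∧ x ≠ 'c' ∧ x ≠ 'g' ∧ x ≠ 't' := by
        simpa using hx
      obtain ⟨h1, h2, h3, h4, h5, h6, h7, h8⟩ := hs
      simp [hni, ih, beq_iff_eq, h1, h2, h3, h4, h5, h6, h7, h8]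

theorem ns_split (t : List Char) :
    t.countP (fun c => PySem.Chars.isIn [c] (['N', 'n'] : List Char))
      = t.count 'N' + t.count 'n' := by
  induction t with
  | nil => rfl
  | cons x s ih =>
    simp only [List.countP_cons, List.count_cons]
    by_cases hx : x ∈ (['N', 'n'] : List Char)
    · have hin : PySem.Chars.isIn [x] ['N', 'n'] = true := (isIn_single _ _).2 hx
      fin_cases hx <;> simp [hin, ih] <;> omega
    · have hni : PySem.Chars.isIn [x] ['N', 'n'] = false := by
        rw [← Bool.not_eq_true, isIn_single]; exact hx
      have hs : x ≠ 'N' ∧ x ≠ 'n' := by simpa using hx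
      simp [hni, ih, beq_iff_eq, hs.1, hs.2]

-- ---- split('#') vs the state machine ----
-- structural form of seq.split('#')
def splitParts : List Char → List (List Char)
  | [] => [[]]
  | c :: rest =>
    if c == '#' then [] :: splitParts rest
    else
      match splitParts rest with
      | [] => [[c]]
      | p :: ps => (c :: p) :: ps

theorem splitParts_ne_nil (l : List Char) : splitParts l ≠ [] := by
  cases l with
  | nil => simp [splitParts]
  | cons c rest =>
    rw [splitParts]
    split
    · simp
    · split <;> simp

def consHead (cur : List Char) : List (List Char) → List (List Char)
  | [] => [cur]
  | p :: ps => (cur ++ p) :: ps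

theorem splitOn_go_spec :
    ∀ (fuel : Nat) (l cur : List Char) (acc : List (List Char)), l.length < fuel →
    PySem.Chars.splitOn.go ['#'] fuel l cur acc
      = acc.reverse ++ consHead cur.reverse (splitParts l) := by
  intro fuel
  induction fuel with
  | zero => intro l cur acc h; omega
  | succ n ih =>
    intro l cur acc h
    cases l with
    | nil =>
      rw [PySem.Chars.splitOn.go]
      all_goals simp [consHead, splitParts]
    | cons c rest =>
      rw [PySem.Chars.splitOn.go]
      by_cases hc : c = '#'
      · subst hc
        have hp : (['#'] : List Char).isPrefixOf ('#' :: rest) = true := by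
          simp [List.isPrefixOf]
        simp only [hp, if_true, List.length_cons, List.length_nil, List.drop_succ_cons, List.drop_zero]
        rw [ih rest [] (cur.reverse :: acc) (by simpa using h)]
        have hco : ('#' == '#') = true := by decide
        rw [splitParts]
        simp only [hco, if_true]
        rcases List.exists_cons_of_ne_nil (splitParts_ne_nil rest) with ⟨p, ps, hps⟩
        rw [hps]
        simp [consHead]
      · have hbeq : ('#' == c) = false := by
          simpa [beq_iff_eq] using fun e => hc e.symm
        have hp : (['#'] : List Char).isPrefixOf (c :: rest) = false := by
          simp [List.isPrefixOf, hbeq]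
        simp only [hp, Bool.false_eq_true, if_false]
        rw [ih rest (c :: cur) acc (by simpa using h)]
        have hcb : (c == '#') = false := by simpa [beq_iff_eq] using hc
        rw [splitParts]
        simp only [hcb, Bool.false_eq_true, if_false]
        rcases List.exists_cons_of_ne_nil (splitParts_ne_nil rest) with ⟨p, ps, hps⟩
        rw [hps]
        simp [consHead]

theorem splitOn_single_eq (l : List Char) :
    PySem.Chars.splitOn l ['#'] = splitParts l := by
  rw [PySem.Chars.splitOn, splitOn_go_spec (l.length + 1) l [] [] (by omega)]
  rcases List.exists_cons_of_ne_nil (splitParts_ne_nil l) with ⟨p, ps, hps⟩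
  rw [hps]
  simp [consHead]

-- the all-dash-parts total of a parts list
def mbpP (ps : List (List Char)) : Int :=
  ((ps.filter (fun p => p.all (fun c => c == '-'))).map (fun p => (p.length : Int))).sum

-- score of the scan state (blk, od) against the pending first part
def gScore (blk : Int) (od : Bool) : List (List Char) → Int
  | [] => 0
  | p :: ps => (if od && p.all (fun c => c == '-') then blk + (p.length : Int) else 0) + mbpP ps

theorem mbpP_cons (p : List Char) (ps : List (List Char)) :
    mbpP (p :: ps) = (if p.all (fun c => c == '-') then (p.length : Int) else 0) + mbpP ps := by
  by_cases h : p.all (fun c => c == '-') <;> simp [mbpP, List.filter_cons, h]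

theorem mbpScan_spec (seq : List Char) :
    ∀ (blk : Int) (od : Bool) (acc : Int),
    mbpScan seq blk od acc = acc + gScore blk od (splitParts seq) := by
  induction seq with
  | nil =>
    intro blk od acc
    cases od <;> simp [mbpScan, splitParts, gScore, mbpP]
  | cons c rest ih =>
    intro blk od acc
    rcases List.exists_cons_of_ne_nil (splitParts_ne_nil rest) with ⟨p, ps, hps⟩
    by_cases hc : c = '#'
    · subst hc
      rw [mbpScan]
      have h1 : ('#' == '#') = true := by decide
      simp only [h1, if_true]
      rw [ih, splitParts]
      simp only [h1, if_true, hps, gScore, mbpP_cons]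
      cases od <;> by_cases hall : p.all (fun c => c == '-') <;>
        simp [hall, List.all_nil] <;> ring
    · have hcb : (c == '#') = false := by simpa [beq_iff_eq] using hc
      by_cases hd : c = '-'
      · subst hd
        rw [mbpScan]
        simp only [hcb, Bool.false_eq_true, if_false]
        have h1 : ('-' == '-') = true := by decide
        simp only [h1, if_true]
        rw [ih, splitParts]
        simp only [hcb, Bool.false_eq_true, if_false, hps, gScore]
        have hallc : (('-' :: p).all (fun c => c == '-')) = p.all (fun c => c == '-') := by
          simp
        rw [hallc]
        cases od <;> by_cases hall : p.all (fun c => c == '-') <;> simp [hall] <;> push_cast <;> ring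
      · have hdb : (c == '-') = false := by simpa [beq_iff_eq] using hd
        rw [mbpScan]
        simp only [hcb, hdb, Bool.false_eq_true, if_false]
        rw [ih, splitParts]
        simp only [hcb, Bool.false_eq_true, if_false, hps, gScore]
        have hallc : ((c :: p).all (fun c => c == '-')) = false := by
          simp [hdb]
        rw [hallc]
        cases od <;> simp

theorem mbpScan_eq (seq : List Char) (m : Int) :
    mbpScan seq 0 true m = m + mbpP (PySem.Chars.splitOn seq ['#']) := by
  rw [mbpScan_spec, splitOn_single_eq]
  rcases List.exists_cons_of_ne_nil (splitParts_ne_nil seq) with ⟨p, ps, hps⟩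
  rw [hps, mbpP_cons]
  simp only [gScore, Bool.true_and]
  by_cases hall : p.all (fun c => c == '-') <;> simp [hall]

-- A's per-sequence split fold is the state machine
theorem mbp_fold_eq (seqs : List (List Char)) :
    seqs.foldl (fun m seq => (PySem.Chars.splitOn seq ['#']).foldl (fun m part =>
        if part.all (fun c => c == '-') then m + (part.length : Int) else m) m) 0
      = seqs.foldl (fun m seq => mbpScan seq 0 true m) 0 := by
  refine PySem.List.foldl_congr_mem' seqs _ _ 0 (fun seq _ m => ?_)
  rw [PySem.List.foldl_if_eq_foldl_filter, PySem.List.foldl_add, mbpScan_eq]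
  rfl


theorem getD_empty_int (c : Char) : (PySem.Dict.empty : PySem.Dict Char Int).getD c 0 = 0 := by
  simp [PySem.Dict.getD, PySem.Dict.get?, PySem.Dict.empty]

-- the combined B fold, decomposed (zeta-reduced form of the port's loop body)
theorem alt_fold_eq (L : Nat) (seqs : List (List Char)) :
    seqs.foldl (fun st seq =>
      ((PySem.Set.union st.1.1 (poundPos L seq),
        some (match st.1.2 with
              | none => poundPos L seq
              | some s => PySem.Set.inter s (poundPos L seq))),
       (seq.foldl (fun d c => d.modify c 0 (· + 1)) st.2.1, mbpScan seq 0 true st.2.2)))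
      (((PySem.Set.empty : PySem.Set Nat), (none : Option (PySem.Set Nat))),
       ((PySem.Dict.empty : PySem.Dict Char Int), (0 : Int)))
    = ((seqs.foldl (fun u seq => PySem.Set.union u (poundPos L seq)) PySem.Set.empty,
        seqs.foldl (fun i seq => some (match i with
              | none => poundPos L seq
              | some s => PySem.Set.inter s (poundPos L seq))) none),
       (seqs.foldl (fun d seq => seq.foldl (fun d c => d.modify c 0 (· + 1)) d) PySem.Dict.empty,
        seqs.foldl (fun m seq => mbpScan seq 0 true m) 0)) :=
  fold4_decompose
    (fun u seq => PySem.Set.union u (poundPos L seq))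
    (fun i seq => some (match i with
        | none => poundPos L seq
        | some s => PySem.Set.inter s (poundPos L seq)))
    (fun (d : PySem.Dict Char Int) seq => seq.foldl (fun d c => d.modify c 0 (· + 1)) d)
    (fun m seq => mbpScan seq 0 true m)
    seqs _ _ _ _

-- total_pound: the zip column count is the size of the union of '#'-position sets
theorem pound_component (seqs : List (List Char)) :
    ((pyZipGo (minLen seqs) seqs).map (fun col => if col.contains '#' then (1:Int) else 0)).sum
      = ((seqs.foldl (fun u seq => PySem.Set.union u (poundPos (minLen seqs) seq))
            (PySem.Set.empty : PySem.Set Nat)).length : Int) := by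
  rw [pound_eq, PySem.List.sum_map_ite_one_zero]
  obtain ⟨hnd, hmem⟩ := unionFold_spec (minLen seqs) seqs PySem.Set.empty List.nodup_nil
  rw [length_eq_countP (minLen seqs) _ (fun j => seqs.any (fun s => s.getD j ' ' == '#')) hnd ?_]
  intro j
  rw [hmem j]
  simp only [PySem.Set.empty, List.not_mem_nil, false_or, mem_poundPos, List.any_eq_true,
    beq_iff_eq]
  constructor
  · rintro ⟨s, hs, hjL, hv⟩; exact ⟨hjL, s, hs, hv⟩
  · rintro ⟨hjL, s, hs, hv⟩; exact ⟨s, hs, hjL, hv⟩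

-- aln_length: columns not all-'#' = L minus the size of the intersection
theorem aln_component (hd : List Char) (tl : List (List Char)) :
    ((pyZipGo (minLen (hd :: tl)) (hd :: tl)).map (fun col =>
        if !(PySem.Set.equal (PySem.Set.ofList col) (PySem.Set.ofList ['#'])) then (1:Int) else 0)).sum
      = (minLen (hd :: tl) : Int) -
        (match (hd :: tl).foldl (fun i seq => some (match i with
             | none => poundPos (minLen (hd :: tl)) seq
             | some s => PySem.Set.inter s (poundPos (minLen (hd :: tl)) seq))) none with
         | some s => (s.length : Int)
         | none => 0) := by
  rw [aln_eq _ (by simp), PySem.List.sum_map_ite_one_zero, List.foldl_cons, optFold_some]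
  simp only []
  obtain ⟨hnd, hmem⟩ := interFold_spec (minLen (hd :: tl)) tl
    (poundPos (minLen (hd :: tl)) hd) (nodup_poundPos _ hd)
  rw [length_eq_countP (minLen (hd :: tl)) _
      (fun j => (hd :: tl).all (fun s => s.getD j ' ' == '#')) hnd ?_]
  · have hc := countP_add_not (fun j => (hd :: tl).all (fun s => s.getD j ' ' == '#'))
      (List.range (minLen (hd :: tl)))
    have hcong : (List.range (minLen (hd :: tl))).countP
          (fun i => (hd :: tl).any (fun s => !(s.getD i ' ' == '#')))
        = (List.range (minLen (hd :: tl))).countP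
          (fun j => !((hd :: tl).all (fun s => s.getD j ' ' == '#'))) := by
      refine List.countP_congr (fun j _ => ?_)
      rw [List.not_all_eq_any_not]
    rw [List.length_range] at hc
    rw [hcong]
    push_cast
    omega
  · intro j
    rw [hmem j]
    simp only [mem_poundPos, List.all_eq_true, List.mem_cons, beq_iff_eq]
    constructor
    · rintro ⟨⟨hjL, hhd⟩, hall⟩
      refine ⟨hjL, fun s hs => ?_⟩
      rcases hs with rfl | hs
      · exact hhd
      · exact (hall s hs).2
    · rintro ⟨hjL, hall⟩
      exact ⟨⟨hjL, hall hd (Or.inl rfl)⟩, fun t ht => ⟨hjL, hall t (Or.inr ht)⟩⟩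

-- the histogram read off at one character is the alignment-wide count
theorem hist_getD (seqs : List (List Char)) (c : Char) :
    (seqs.foldl (fun d seq => seq.foldl (fun d c => d.modify c 0 (· + 1)) d)
      (PySem.Dict.empty : PySem.Dict Char Int)).getD c 0
      = (seqs.map (fun s => (s.count c : Int))).sum := by
  rw [histFold_getD, getD_empty_int, zero_add]

theorem nt_component (seqs : List (List Char)) :
    (seqs.map (fun seq =>
        (seq.map (fun c => if PySem.Chars.isIn [c] "ACGTacgt".toList then (1:Int) else 0)).sum)).sum
      = ("ACGTacgt".toList.map (fun c =>
          (seqs.foldl (fun d seq => seq.foldl (fun d c => d.modify c 0 (· + 1)) d)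
            (PySem.Dict.empty : PySem.Dict Char Int)).getD c 0)).sum := by
  have hL : ∀ seq ∈ seqs,
      (seq.map (fun c => if PySem.Chars.isIn [c] "ACGTacgt".toList then (1:Int) else 0)).sum
        = (seq.count 'A' : Int) + seq.count 'C' + seq.count 'G' + seq.count 'T'
          + seq.count 'a' + seq.count 'c' + seq.count 'g' + seq.count 't' := by
    intro seq _
    rw [acgt_toList, PySem.List.sum_map_ite_one_zero, nt_split]
    push_cast
    ring
  rw [List.map_congr_left hL, acgt_toList]
  simp only [List.map_cons, List.map_nil, List.sum_cons, List.sum_nil, hist_getD]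
  simp only [PySem.List.sum_map_add_int]
  ring

theorem ns_component (seqs : List (List Char)) :
    (seqs.map (fun seq =>
        (seq.map (fun c => if PySem.Chars.isIn [c] "Nn".toList then (1:Int) else 0)).sum)).sum
      = (seqs.foldl (fun d seq => seq.foldl (fun d c => d.modify c 0 (· + 1)) d)
          (PySem.Dict.empty : PySem.Dict Char Int)).getD 'N' 0
        + (seqs.foldl (fun d seq => seq.foldl (fun d c => d.modify c 0 (· + 1)) d)
          (PySem.Dict.empty : PySem.Dict Char Int)).getD 'n' 0 := by
  have hL : ∀ seq ∈ seqs,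
      (seq.map (fun c => if PySem.Chars.isIn [c] "Nn".toList then (1:Int) else 0)).sum
        = (seq.count 'N' : Int) + seq.count 'n' := by
    intro seq _
    rw [nn_toList, PySem.List.sum_map_ite_one_zero, ns_split]
    push_cast
    ring
  rw [List.map_congr_left hL]
  simp only [hist_getD, PySem.List.sum_map_add_int]

theorem count_component (seqs : List (List Char)) (c : Char) :
    (seqs.map (fun seq => (PySem.Chars.count seq [c] : Int))).sum
      = (seqs.foldl (fun d seq => seq.foldl (fun d c => d.modify c 0 (· + 1)) d)
          (PySem.Dict.empty : PySem.Dict Char Int)).getD c 0 := by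
  rw [hist_getD]
  refine congrArg List.sum (List.map_congr_left (fun seq _ => ?_))
  rw [count_single]
-- ===== VERDICT (by name: the statement is the Claim_ definition above) =====
theorem compute_summary_after_spec : Claim_equal_compute_summary_after := by
  intro alignment _
  unfold Spec_compute_summary_after
  cases alignment with
  | nil => rfl
  | cons hd tl =>
    simp only [compute_summary_after, compute_summary_after_alt, List.map_cons]
    rw [alt_fold_eq]
    simp only [List.cons.injEq, Prod.mk.injEq, true_and, and_true]
    have hnt := nt_component (hd.2.toList :: tl.map (fun p => p.2.toList))
    have hgap := count_component (hd.2.toList :: tl.map (fun p => p.2.toList)) '-'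
    have hns := ns_component (hd.2.toList :: tl.map (fun p => p.2.toList))
    have hqm := count_component (hd.2.toList :: tl.map (fun p => p.2.toList)) '?'
    have hpd := pound_component (hd.2.toList :: tl.map (fun p => p.2.toList))
    have hmbp := mbp_fold_eq (hd.2.toList :: tl.map (fun p => p.2.toList))
    simp only [List.map_cons, List.foldl_cons] at hnt hgap hns hqm hpd hmbp
    refine ⟨?_, ?_, ?_, ?_, ?_, ?_, ?_, ?_, ?_⟩
    · simp
    · exact aln_component hd.2.toList (tl.map (fun p => p.2.toList))
    · exact hnt
    · exact hgap
    · exact hns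
    · exact hqm
    · exact hpd
    · exact hmbp
    · exact congrArg₂ (· + ·) hqm hmbp
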